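-- pv_equiv track=rewrite | github.com/pypi-data/pypi-mirror-400 | packages/pythonpine/pythonpine-2.0.1.tar.gz/pythonpine-2.0.1/time_session.py | time_since_last_extreme
-- ===== SOURCE A (Python) =====
-- def time_since_last_extreme(priceList, extreme='high'):
--     last_time = 0
--     time_since = []
--     for i in range(len(priceList)):
--         if i == 0 or (extreme == 'high' and priceList[i] >= max(priceList[:i+1])) or (extreme == 'low' and priceList[i] <= min(priceList[:i+1])):
--             last_time = 0
--         else:
--             last_time += 1
--         time_since.append(last_time)
--     return time_since
-- ===== SOURCE B (Python) =====
-- def time_since_last_extreme(priceList, extreme='high'):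
--     # One pass: maintain the running extreme instead of rescanning the prefix.
--     res = []
--     last = 0
--     m = None
--     for p in priceList:
--         if m is None:
--             last = 0
--             m = p
--         elif extreme == 'high':
--             m = max(m, p)
--             last = 0 if p >= m else last + 1
--         elif extreme == 'low':
--             m = min(m, p)
--             last = 0 if p <= m else last + 1
--         else:
--             last += 1
--         res.append(last)
--     return res
-- ===== Notes on version B (the rewrite author's own statement) =====
-- stated objective: alternative
-- what changed: B maintains the running max/min incrementally in a single pass instead of recomputing max/min of the whole prefix slice at every index; it trades A's per-index prefix rescan for carried state.
import Mathlib
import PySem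

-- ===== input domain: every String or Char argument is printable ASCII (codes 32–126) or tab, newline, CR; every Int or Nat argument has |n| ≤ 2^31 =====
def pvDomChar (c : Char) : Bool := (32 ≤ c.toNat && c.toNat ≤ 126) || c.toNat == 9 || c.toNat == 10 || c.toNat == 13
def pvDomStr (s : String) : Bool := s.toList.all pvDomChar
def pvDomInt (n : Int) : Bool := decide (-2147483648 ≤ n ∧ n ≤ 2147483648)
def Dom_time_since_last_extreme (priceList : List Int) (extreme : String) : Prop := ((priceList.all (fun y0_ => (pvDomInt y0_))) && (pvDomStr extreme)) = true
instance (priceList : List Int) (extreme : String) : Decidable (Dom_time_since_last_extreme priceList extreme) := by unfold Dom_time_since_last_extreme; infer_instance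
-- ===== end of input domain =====

-- B replaces A's per-index rescan of the prefix (max/min of priceList[:i+1]) by a running extreme carried through one pass.

-- ===== PORT A =====
-- one loop iteration of A: i is the current index; state = (last_time, time_since).
-- (the slice priceList[:i+1] is nonempty for every i in range(len(priceList)), so Python's
--  max/min never raises; the .getD 0 default is never reached)
def pvStepA (priceList : List Int) (extreme : String) (st : Int × List Int) (i : Int) : Int × List Int :=
  let cond : Bool :=
    (i == 0) ||
    ((extreme == "high") && decide (PySem.List.pyGetD priceList i 0 ≥
        ((PySem.List.max? (PySem.List.slice priceList (some 0) (some (i + 1))) (fun y => y)).getD 0))) ||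
    ((extreme == "low") && decide (PySem.List.pyGetD priceList i 0 ≤
        ((PySem.List.min? (PySem.List.slice priceList (some 0) (some (i + 1))) (fun y => y)).getD 0)))
  let last_time := if cond then 0 else st.1 + 1
  (last_time, st.2 ++ [last_time])

def time_since_last_extreme (priceList : List Int) (extreme : String) : List Int :=
  ((PySem.List.pyRange 0 priceList.length 1).foldl (pvStepA priceList extreme) (0, [])).2

-- ===== PORT B =====
-- B's loop: m = running extreme of the prefix seen so far (none before the first element), last = counter
def pvGoB (extreme : String) (xs : List Int) (m : Option Int) (last : Int) : List Int :=
  match xs with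
  | [] => []
  | p :: rest =>
    match m with
    | none => 0 :: pvGoB extreme rest (some p) 0
    | some mv =>
      if extreme == "high" then
        let m' := max mv p
        let l := if p ≥ m' then 0 else last + 1
        l :: pvGoB extreme rest (some m') l
      else if extreme == "low" then
        let m' := min mv p
        let l := if p ≤ m' then 0 else last + 1
        l :: pvGoB extreme rest (some m') l
      else
        (last + 1) :: pvGoB extreme rest (some mv) (last + 1)

def time_since_last_extreme_alt (priceList : List Int) (extreme : String) : List Int :=
  pvGoB extreme priceList none 0

-- ===== PRECONDITION & SPEC =====
def Spec_time_since_last_extreme (priceList : List Int) (extreme : String) (out : List Int) : Prop := out = time_since_last_extreme_alt priceList extreme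
instance (priceList : List Int) (extreme : String) (out : List Int) : Decidable (Spec_time_since_last_extreme priceList extreme out) := by unfold Spec_time_since_last_extreme; infer_instance

-- ===== CLAIM (what is proved, stated in full; the proofs are below) =====
def Claim_equal_time_since_last_extreme : Prop := ∀ (priceList : List Int) (extreme : String), Dom_time_since_last_extreme priceList extreme → Spec_time_since_last_extreme priceList extreme (time_since_last_extreme priceList extreme)

-- ===== LEMMAS AND PROOFS =====

-- Invariant: after A has processed indices [0, (q::t).length) of (q::t) ++ rest with loop state (last, acc),
-- the rest of the fold appends exactly B's continuation, provided mv is the running max (resp. min) of q::t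
-- in the "high" (resp. "low") case (mv is arbitrary otherwise: B never inspects it then).
theorem pvInvariant (extreme : String) (rest : List Int) :
    ∀ (q : Int) (t : List Int) (mv last : Int) (acc : List Int),
      ((extreme == "high") = true → mv = t.foldl max q) →
      ((extreme == "low") = true → mv = t.foldl min q) →
      ((PySem.List.pyRange ((q :: t).length) (((q :: t) ++ rest).length) 1).foldl
          (pvStepA ((q :: t) ++ rest) extreme) (last, acc)).2
        = acc ++ pvGoB extreme rest (some mv) last := by
  induction rest with
  | nil =>
    intro q t mv last acc _ _
    simp [PySem.List.pyRange_one_eq_nil, pvGoB]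
  | cons p rest ih =>
    intro q t mv last acc hhi hlo
    have hcons : PySem.List.pyRange ((q :: t).length) (((q :: t) ++ p :: rest).length) 1
        = ((q :: t).length : Int) :: PySem.List.pyRange (((q :: t).length : Int) + 1) (((q :: t) ++ p :: rest).length) 1 := by
      apply PySem.List.pyRange_one_cons
      simp
    rw [hcons, List.foldl_cons]
    have hne0 : (((q :: t).length : Int) == 0) = false := by
      simp
      omega
    have hget : PySem.List.pyGetD ((q :: t) ++ p :: rest) ((q :: t).length : Int) 0 = p := by
      rw [PySem.List.pyGetD_natCast]
      simp [List.getD]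
    have htake : PySem.List.slice ((q :: t) ++ p :: rest) (some 0) (some (((q :: t).length : Int) + 1))
        = q :: (t ++ [p]) := by
      have h1 : ((q :: t).length : Int) + 1 = (((q :: t).length + 1 : Nat) : Int) := by push_cast; ring
      rw [h1, PySem.List.slice_zero_start, PySem.List.slice_to_natCast]
      rw [List.take_append]
      simp [List.take_of_length_le]
    have hmax : (PySem.List.max? (q :: (t ++ [p])) (fun y => y)).getD 0 = max (t.foldl max q) p := by
      rw [PySem.List.max?_id_cons]
      simp [List.foldl_append]
    have hmin : (PySem.List.min? (q :: (t ++ [p])) (fun y => y)).getD 0 = min (t.foldl min q) p := by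
      rw [PySem.List.min?_id_cons]
      simp [List.foldl_append]
    have happ : (q :: t) ++ p :: rest = (q :: (t ++ [p])) ++ rest := by simp
    have hlen1 : ((q :: t).length : Int) + 1 = ((q :: (t ++ [p])).length : Int) := by
      push_cast [List.length_append, List.length_cons]; simp
    by_cases hH : (extreme == "high") = true
    · -- extreme = "high"
      have hE : extreme = "high" := by simpa using hH
      subst hE
      have hmv : mv = t.foldl max q := hhi rfl
      have hstep : pvStepA ((q :: t) ++ p :: rest) "high" (last, acc) ((q :: t).length : Int)
          = ((if p ≥ max mv p then 0 else last + 1),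
             acc ++ [(if p ≥ max mv p then 0 else last + 1)]) := by
        simp only [pvStepA, hne0, hget, htake, hmax, hmv]
        simp [max_comm]
      rw [hstep]
      have hIH := ih q (t ++ [p]) (max mv p) (if p ≥ max mv p then 0 else last + 1)
        (acc ++ [(if p ≥ max mv p then 0 else last + 1)])
        (fun _ => by rw [List.foldl_append, hmv]; rfl)
        (fun h => by simp at h)
      rw [happ, hlen1, hIH]
      simp [pvGoB]
    · by_cases hL : (extreme == "low") = true
      · -- extreme = "low"
        have hE : extreme = "low" := by simpa using hL
        subst hE
        have hmv : mv = t.foldl min q := hlo rfl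
        have hstep : pvStepA ((q :: t) ++ p :: rest) "low" (last, acc) ((q :: t).length : Int)
            = ((if p ≤ min mv p then 0 else last + 1),
               acc ++ [(if p ≤ min mv p then 0 else last + 1)]) := by
          simp only [pvStepA, hne0, hget, htake, hmin, hmv]
          simp [min_comm]
        rw [hstep]
        have hIH := ih q (t ++ [p]) (min mv p) (if p ≤ min mv p then 0 else last + 1)
          (acc ++ [(if p ≤ min mv p then 0 else last + 1)])
          (fun h => by simp at h)
          (fun _ => by rw [List.foldl_append, hmv]; rfl)
        rw [happ, hlen1, hIH]
        simp [pvGoB]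
      · -- extreme is neither "high" nor "low"
        have hstep : pvStepA ((q :: t) ++ p :: rest) extreme (last, acc) ((q :: t).length : Int)
            = (last + 1, acc ++ [last + 1]) := by
          simp [pvStepA, hH, hL]
          omega
        rw [hstep]
        have hIH := ih q (t ++ [p]) mv (last + 1) (acc ++ [last + 1])
          (fun h => absurd h hH)
          (fun h => absurd h hL)
        rw [happ, hlen1, hIH]
        simp [pvGoB, hH, hL]

-- ===== VERDICT (by name: the statement is the Claim_ definition above) =====
theorem time_since_last_extreme_spec : Claim_equal_time_since_last_extreme := by
  intro priceList extreme _
  unfold Spec_time_since_last_extreme time_since_last_extreme time_since_last_extreme_alt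
  cases priceList with
  | nil => simp [PySem.List.pyRange_one_eq_nil, pvGoB]
  | cons p ps =>
    have hcons : PySem.List.pyRange 0 ((p :: ps).length) 1
        = (0 : Int) :: PySem.List.pyRange 1 ((p :: ps).length) 1 := by
      apply PySem.List.pyRange_one_cons
      simp
    rw [hcons, List.foldl_cons]
    have hstep : pvStepA (p :: ps) extreme ((0 : Int), ([] : List Int)) 0 = (0, [0]) := by
      simp [pvStepA]
    rw [hstep]
    have h := pvInvariant extreme ps p [] p 0 [0] (fun _ => rfl) (fun _ => rfl)
    simp only [List.cons_append, List.nil_append] at h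
    simpa [pvGoB] using h
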